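-- pv_equiv track=rewrite | github.com/cosarara/aoc | 2021/day06/day06.py | zero_fish_iter
-- ===== SOURCE A (Python) =====
-- def zero_fish_iter(days, verbose=False):
--     """ the iterative solution here should be optimal;
--     it could be made faster by rolling around a fixed-size
--     array properly initialized to 1s and rolling around
--     only the indices."""
--     if days == 0:
--         return 1
--     window = []
--     for i in range(days):
--         # 7 takes -2st and 0th = 2
--         # 8 takes -1st and 1st = 3
--         # 9 takes 0th and 2nd = 3
--         # 10 takes 1st and 3rd = 4
--         i = len(window) - 9
--         j = len(window) - 7
--         if i < 0:
--             a = 1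
--         else:
--             a = window[i]
--         if j < 0:
--             b = 1
--         else:
--             b = window[j]
--         window.append(a+b)
--         #if len(window) > 9: # popping makes it slow actually
--         #    window.pop(0)
--     return window[-1]
-- ===== SOURCE B (Python) =====
-- def zero_fish_iter(days, verbose=False):
--     """Same value as the iterative version, computed by binary exponentiation
--     of the 9x9 companion matrix of f(n) = f(n-7) + f(n-9), f(n) = 1 for n <= 0."""
--     # companion matrix: state (f(n), f(n-1), ..., f(n-8))
--     M = [[1 if (i == 0 and j in (6, 8)) or (i > 0 and j == i - 1) else 0
--           for j in range(9)] for i in range(9)]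
--
--     def mmul(A, B):
--         return [[sum(A[i][k] * B[k][j] for k in range(9)) for j in range(9)]
--                 for i in range(9)]
--
--     R = [[1 if i == j else 0 for j in range(9)] for i in range(9)]  # identity
--     P = M
--     e = days
--     while e > 0:
--         if e % 2 == 1:
--             R = mmul(R, P)
--         P = mmul(P, P)
--         e //= 2
--     # initial state is all ones, so f(days) = sum of row 0 of M^days
--     return sum(R[0])
-- ===== Notes on version B (the rewrite author's own statement) =====
-- stated objective: alternative
-- what changed: Replaces the day-by-day window list (one recurrence step per day) with binary exponentiation of the 9x9 companion matrix of f(n)=f(n-7)+f(n-9), summing row 0 of M^days; fewer steps (O(log days)) but each is a big-int matrix product, measured about the same wall-clock.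
import Mathlib
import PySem

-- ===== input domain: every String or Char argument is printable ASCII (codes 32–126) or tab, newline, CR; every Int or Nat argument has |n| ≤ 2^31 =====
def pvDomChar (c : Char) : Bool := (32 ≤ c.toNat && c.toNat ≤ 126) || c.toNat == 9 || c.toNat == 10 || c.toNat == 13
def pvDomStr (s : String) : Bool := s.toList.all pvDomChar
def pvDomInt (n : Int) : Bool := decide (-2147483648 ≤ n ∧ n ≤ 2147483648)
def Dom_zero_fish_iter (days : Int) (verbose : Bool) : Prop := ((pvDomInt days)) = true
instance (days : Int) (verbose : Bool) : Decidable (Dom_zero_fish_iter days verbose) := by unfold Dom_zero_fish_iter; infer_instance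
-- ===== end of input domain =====

-- B replaces the day-by-day window list with binary exponentiation of the 9x9
-- companion matrix of f(n) = f(n-7) + f(n-9) (objective: alternative algorithm).


-- ===== PORT A =====
-- loop body of A ('window.append(a+b)'); the .getD 0 is unreachable: when the
-- branch is taken the index is nonnegative and < len(window)
def pvStepA (window : List Int) : List Int :=
  let i : Int := (window.length : Int) - 9
  let j : Int := (window.length : Int) - 7
  let a : Int := if i < 0 then 1 else (PySem.List.pyGet? window i).getD 0
  let b : Int := if j < 0 then 1 else (PySem.List.pyGet? window j).getD 0
  window ++ [a + b]

def zero_fish_iter (days : Int) (verbose : Bool) : Int :=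
  if days = 0 then 1
  else
    let window := (PySem.List.pyRange 0 days 1).foldl (fun window _ => pvStepA window) []
    -- window[-1]: raises (none) exactly when window is empty, i.e. days < 0 — excluded by Pre_
    (PySem.List.pyGet? window (-1)).getD 0

-- ===== PORT B =====
-- Python's 9x9 list-of-lists matrices are ported as List (List Int).
-- A[i][k]: both indices stay in range (9x9 grids throughout), so the getD defaults never fire
def pvIdx (M : List (List Int)) (i k : Nat) : Int := (M.getD i []).getD k 0

-- companion matrix of the state (f(n), f(n-1), ..., f(n-8))
def pvM : List (List Int) :=
  (List.range 9).map (fun i => (List.range 9).map (fun j =>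
    if (i = 0 ∧ (j = 6 ∨ j = 8)) ∨ (0 < i ∧ j + 1 = i) then (1 : Int) else 0))

-- mmul(A, B): [[sum(A[i][k] * B[k][j] for k in range(9)) for j in range(9)] for i in range(9)]
def pvMmul (A B : List (List Int)) : List (List Int) :=
  (List.range 9).map (fun i => (List.range 9).map (fun j =>
    ((List.range 9).map (fun k => pvIdx A i k * pvIdx B k j)).sum))

-- identity matrix R
def pvId : List (List Int) :=
  (List.range 9).map (fun i => (List.range 9).map (fun j => if i = j then (1 : Int) else 0))

-- the 'while e > 0' square-and-multiply loop, recursion on e (e //= 2)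
def pvBexp (e : Nat) (R P : List (List Int)) : List (List Int) :=
  if e = 0 then R
  else pvBexp (e / 2) (if e % 2 = 1 then pvMmul R P else R) (pvMmul P P)
termination_by e
decreasing_by omega

def zero_fish_iter_alt (days : Int) (verbose : Bool) : Int :=
  -- e = days; while e > 0 … : for days ≤ 0 the loop body never runs, as with toNat
  let R := pvBexp days.toNat pvId pvM
  -- return sum(R[0])
  (R.getD 0 []).sum

-- ===== PRECONDITION & SPEC =====
-- A raises IndexError (window[-1] on the empty window) for days < 0; Pre_ excludes exactly that.
def Pre_zero_fish_iter (days : Int) (verbose : Bool) : Prop := 0 ≤ days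
instance (days : Int) (verbose : Bool) : Decidable (Pre_zero_fish_iter days verbose) := by
  unfold Pre_zero_fish_iter; infer_instance

def pvWitness_zero_fish_iter : Int × Bool := (80, false)

def Spec_zero_fish_iter (days : Int) (verbose : Bool) (out : Int) : Prop := out = zero_fish_iter_alt days verbose
instance (days : Int) (verbose : Bool) (out : Int) : Decidable (Spec_zero_fish_iter days verbose out) := by unfold Spec_zero_fish_iter; infer_instance

-- ===== CLAIM (what is proved, stated in full; the proofs are below) =====
def Claim_equal_zero_fish_iter : Prop := ∀ (days : Int) (verbose : Bool), Dom_zero_fish_iter days verbose → Pre_zero_fish_iter days verbose → Spec_zero_fish_iter days verbose (zero_fish_iter days verbose)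

-- ===== LEMMAS AND PROOFS =====

-- the lanternfish recurrence: f(n) = f(n-9) + f(n-7), f(n) = 1 for n ≤ 0
def fseq : Nat → Int
  | 0 => 1
  | n + 1 => fseq (n + 1 - 9) + fseq (n + 1 - 7)

lemma fseq_zero : fseq 0 = 1 := by rw [fseq]

lemma fseq_succ (n : Nat) : fseq (n + 1) = fseq (n + 1 - 9) + fseq (n + 1 - 7) := by rw [fseq]

-- ---- A-side: the loop computes fseq ----

lemma foldl_ignore {α β : Type} (g : α → α) (l : List β) (x : α) :
    l.foldl (fun a _ => g a) x = g^[l.length] x := by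
  induction l generalizing x with
  | nil => rfl
  | cons h t ih => simp [List.foldl_cons, ih, Function.iterate_succ_apply]

lemma stepA_iterate (n : Nat) :
    pvStepA^[n] [] = (List.range n).map (fun k => fseq (k + 1)) := by
  induction n with
  | zero => rfl
  | succ n ih =>
    rw [Function.iterate_succ_apply', ih]
    have hlen : ((List.range n).map (fun k => fseq (k + 1))).length = n := by simp
    unfold pvStepA
    rw [List.range_succ, List.map_append]
    simp only [hlen]
    congr 1
    have ha : (if ((n : Int) - 9) < 0 then (1 : Int)
        else (PySem.List.pyGet? ((List.range n).map (fun k => fseq (k + 1))) ((n : Int) - 9)).getD 0)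
        = fseq (n + 1 - 9) := by
      by_cases h : n < 9
      · have : (n : Int) - 9 < 0 := by omega
        rw [if_pos this]
        have : n + 1 - 9 = 0 := by omega
        rw [this, fseq_zero]
      · have h9 : ¬ ((n : Int) - 9 < 0) := by omega
        rw [if_neg h9]
        have : (n : Int) - 9 = ((n - 9 : Nat) : Int) := by omega
        rw [this, PySem.List.pyGet?_natCast]
        have hlt : n - 9 < n := by omega
        rw [List.getElem?_map]
        simp [List.getElem?_range hlt]
        congr 1
        omega
    have hb : (if ((n : Int) - 7) < 0 then (1 : Int)
        else (PySem.List.pyGet? ((List.range n).map (fun k => fseq (k + 1))) ((n : Int) - 7)).getD 0)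
        = fseq (n + 1 - 7) := by
      by_cases h : n < 7
      · have : (n : Int) - 7 < 0 := by omega
        rw [if_pos this]
        have : n + 1 - 7 = 0 := by omega
        rw [this, fseq_zero]
      · have h7 : ¬ ((n : Int) - 7 < 0) := by omega
        rw [if_neg h7]
        have : (n : Int) - 7 = ((n - 7 : Nat) : Int) := by omega
        rw [this, PySem.List.pyGet?_natCast]
        have hlt : n - 7 < n := by omega
        rw [List.getElem?_map]
        simp [List.getElem?_range hlt]
        congr 1
        omega
    simp only [ha, hb]
    simp [fseq_succ]

lemma zero_fish_iter_eq_fseq (days : Int) (h : 0 ≤ days) (verbose : Bool) :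
    zero_fish_iter days verbose = fseq days.toNat := by
  unfold zero_fish_iter
  by_cases h0 : days = 0
  · simp [h0, fseq_zero]
  · rw [if_neg h0]
    obtain ⟨n, rfl⟩ : ∃ n : Nat, days = (n : Int) := ⟨days.toNat, (Int.toNat_of_nonneg h).symm⟩
    have hn : 0 < n := by omega
    rw [PySem.List.pyRange_zero_natCast n]
    rw [foldl_ignore pvStepA]
    simp only [List.length_map, List.length_range]
    rw [stepA_iterate n]
    have hlen : ((List.range n).map (fun k => fseq (k + 1))).length = n := by simp
    have : PySem.List.pyGet? ((List.range n).map (fun k => fseq (k + 1))) (-1)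
        = some (fseq n) := by
      simp [PySem.List.pyGet?, PySem.List.pyIdx?, hlen]
      rw [if_pos (by omega : 1 ≤ n)]
      simp [List.getElem?_range (show n - 1 < n by omega)]
      congr 1
      omega
    rw [this]
    simp

-- ---- B-side: binary matrix exponentiation computes fseq ----

lemma map_range_getD {α : Type} (f : Nat → α) (d : α) {n i : Nat} (h : i < n) :
    ((List.range n).map f).getD i d = f i := by
  simp [List.getD_eq_getElem?_getD, List.getElem?_map, List.getElem?_range h]

lemma sum_map_range9 (g : Nat → Int) :
    ((List.range 9).map g).sum = ∑ k : Fin 9, g (k : Nat) := by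
  simp [List.range_succ, Fin.sum_univ_succ]

lemma idx_mmul (A B : List (List Int)) {i j : Nat} (hi : i < 9) (hj : j < 9) :
    pvIdx (pvMmul A B) i j = ((List.range 9).map (fun k => pvIdx A i k * pvIdx B k j)).sum := by
  show ((pvMmul A B).getD i []).getD j 0 = _
  unfold pvMmul
  rw [map_range_getD _ _ hi, map_range_getD _ _ hj]

def pvToM (L : List (List Int)) : Matrix (Fin 9) (Fin 9) Int :=
  Matrix.of fun i j => pvIdx L i j

lemma toM_mmul (A B : List (List Int)) : pvToM (pvMmul A B) = pvToM A * pvToM B := by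
  ext i j
  show pvIdx (pvMmul A B) i j = _
  rw [idx_mmul A B i.isLt j.isLt, sum_map_range9, Matrix.mul_apply]
  rfl

lemma toM_id : pvToM pvId = 1 := by
  ext i j
  show ((pvId.getD i []).getD j 0) = _
  unfold pvId
  rw [map_range_getD _ _ i.isLt, map_range_getD _ _ j.isLt]
  simp [Matrix.one_apply, Fin.ext_iff]

lemma pvM_entry (i j : Fin 9) : pvToM pvM i j =
    if ((i : Nat) = 0 ∧ ((j : Nat) = 6 ∨ (j : Nat) = 8)) ∨ (0 < (i : Nat) ∧ (j : Nat) + 1 = (i : Nat))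
    then 1 else 0 := by
  show ((pvM.getD i []).getD j 0) = _
  unfold pvM
  rw [map_range_getD _ _ i.isLt, map_range_getD _ _ j.isLt]

-- the 9x9 grids are equal to the tabulation of their own entries (shape invariant)
def pvWfM (L : List (List Int)) : Prop :=
  (List.range 9).map (fun i => (List.range 9).map (fun j => pvIdx L i j)) = L

lemma wf_id : pvWfM pvId := by unfold pvWfM; decide

lemma wf_mmul (A B : List (List Int)) : pvWfM (pvMmul A B) := by
  unfold pvWfM
  conv_rhs => rw [show pvMmul A B = (List.range 9).map (fun i => (List.range 9).map (fun j =>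
    ((List.range 9).map (fun k => pvIdx A i k * pvIdx B k j)).sum)) from rfl]
  refine List.map_congr_left (fun i hi => ?_)
  refine List.map_congr_left (fun j hj => ?_)
  exact idx_mmul A B (List.mem_range.mp hi) (List.mem_range.mp hj)

lemma wf_bexp (e : Nat) : ∀ (R P : List (List Int)), pvWfM R → pvWfM (pvBexp e R P) := by
  induction e using Nat.strong_induction_on with
  | _ e ih =>
    intro R P hR
    rw [pvBexp]
    by_cases h0 : e = 0
    · simpa [h0] using hR
    · rw [if_neg h0]
      refine ih (e / 2) (by omega) _ _ ?_
      by_cases h1 : e % 2 = 1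
      · rw [if_pos h1]; exact wf_mmul R P
      · rw [if_neg h1]; exact hR

lemma bexp_eq_pow (e : Nat) : ∀ (R P : List (List Int)),
    pvToM (pvBexp e R P) = pvToM R * (pvToM P) ^ e := by
  induction e using Nat.strong_induction_on with
  | _ e ih =>
    intro R P
    rw [pvBexp]
    by_cases h0 : e = 0
    · simp [h0]
    · rw [if_neg h0]
      rw [ih (e / 2) (by omega)]
      rw [toM_mmul]
      rw [show pvToM P * pvToM P = (pvToM P) ^ 2 from (sq (pvToM P)).symm]
      rw [← pow_mul]
      by_cases h1 : e % 2 = 1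
      · rw [if_pos h1, toM_mmul, mul_assoc, ← pow_succ']
        rw [show 2 * (e / 2) + 1 = e by omega]
      · rw [if_neg h1]
        rw [show 2 * (e / 2) = e by omega]

-- the state vector after n days
def pvVs (n : Nat) : Fin 9 → Int := fun i => fseq (n - (i : Nat))

lemma pow_mulVec_ones (n : Nat) :
    ((pvToM pvM) ^ n).mulVec (fun _ => 1) = pvVs n := by
  induction n with
  | zero =>
    rw [pow_zero, Matrix.one_mulVec]
    funext i
    simp [pvVs, fseq_zero]
  | succ n ih =>
    rw [pow_succ']
    rw [← Matrix.mulVec_mulVec, ih]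
    funext i
    show ∑ j, pvToM pvM i j * pvVs n j = pvVs (n + 1) i
    fin_cases i
    · simp [pvM_entry, pvVs, Fin.sum_univ_succ]
      rw [fseq_succ, show n + 1 - 9 = n - 8 by omega, show n + 1 - 7 = n - 6 by omega]
      ring
    all_goals simp [pvM_entry, pvVs, Fin.sum_univ_succ]

lemma zero_fish_iter_alt_eq_fseq (days : Int) (verbose : Bool) :
    zero_fish_iter_alt days verbose = fseq days.toNat := by
  unfold zero_fish_iter_alt
  have hwf : pvWfM (pvBexp days.toNat pvId pvM) := wf_bexp days.toNat pvId pvM wf_id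
  have hR : pvToM (pvBexp days.toNat pvId pvM) = (pvToM pvM) ^ days.toNat := by
    rw [bexp_eq_pow, toM_id, one_mul]
  have hrow : (pvBexp days.toNat pvId pvM).getD 0 []
      = (List.range 9).map (fun j => pvIdx (pvBexp days.toNat pvId pvM) 0 j) := by
    conv_lhs => rw [← hwf]
    rw [map_range_getD _ _ (show 0 < 9 by norm_num)]
  show ((pvBexp days.toNat pvId pvM).getD 0 []).sum = fseq days.toNat
  rw [hrow, sum_map_range9]
  calc ∑ k : Fin 9, pvIdx (pvBexp days.toNat pvId pvM) 0 (k : Nat)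
      = ∑ k : Fin 9, ((pvToM pvM) ^ days.toNat) 0 k := by
        refine Finset.sum_congr rfl (fun k _ => ?_)
        rw [← hR]
        rfl
    _ = ((pvToM pvM) ^ days.toNat).mulVec (fun _ => 1) 0 := by
        simp [Matrix.mulVec, dotProduct]
    _ = pvVs days.toNat 0 := by rw [pow_mulVec_ones]
    _ = fseq days.toNat := by simp [pvVs]

-- ===== VERDICT (by name: the statement is the Claim_ definition above) =====
theorem zero_fish_iter_spec : Claim_equal_zero_fish_iter := by
  intro days verbose _ hpre
  unfold Spec_zero_fish_iter
  rw [zero_fish_iter_eq_fseq days hpre verbose, zero_fish_iter_alt_eq_fseq]
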